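-- pv_equiv track=rewrite | github.com/CLEVER1337/acmp_agent | solutions/419.py | reconstruct_with_addition
-- ===== SOURCE A (Python) =====
-- def is_letter(c):
--     return 'a' <= c <= 'z' or 'A' <= c <= 'Z'
--
-- def reconstruct_with_addition(s, pos, correct_char):
--     letters = [c for c in s if is_letter(c)]
--     result = []
--     letter_count = 0
--
--     for c in s:
--         if is_letter(c):
--             if letter_count == pos:
--                 result.append(correct_char.upper() if c.isupper() else correct_char)
--                 result.append(c)
--             else:
--                 result.append(c)
--             letter_count += 1
--         else:
--             result.append(c)
--
--     return ''.join(result)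
-- ===== SOURCE B (Python) =====
-- def is_letter(c):
--     return 'a' <= c <= 'z' or 'A' <= c <= 'Z'
--
-- def reconstruct_with_addition(s, pos, correct_char):
--     count = 0
--     for i, c in enumerate(s):
--         if is_letter(c):
--             if count == pos:
--                 cased = correct_char.upper() if c.isupper() else correct_char
--                 return s[:i] + cased + s[i:]
--             count += 1
--     return s
-- ===== Notes on version B (the rewrite author's own statement) =====
-- stated objective: simpler
-- what changed: B scans only until the pos-th letter, records its string index, and builds the result with two slices and one concatenation (early return), instead of A's full pass appending every character to a result list.
import Mathlib
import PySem

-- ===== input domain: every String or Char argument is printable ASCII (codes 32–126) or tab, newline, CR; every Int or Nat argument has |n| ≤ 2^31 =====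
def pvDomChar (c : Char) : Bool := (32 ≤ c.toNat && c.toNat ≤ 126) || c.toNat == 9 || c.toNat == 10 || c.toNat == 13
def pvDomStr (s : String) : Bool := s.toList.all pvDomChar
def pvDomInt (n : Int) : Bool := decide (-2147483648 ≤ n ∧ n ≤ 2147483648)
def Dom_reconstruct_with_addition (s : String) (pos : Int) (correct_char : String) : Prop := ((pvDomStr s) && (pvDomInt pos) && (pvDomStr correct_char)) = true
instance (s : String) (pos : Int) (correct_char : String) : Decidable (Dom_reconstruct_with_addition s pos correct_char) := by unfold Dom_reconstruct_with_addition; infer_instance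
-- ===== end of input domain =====

-- B replaces A's full append-every-character pass by a scan that stops at the
-- pos-th letter and splices correct_char in with two slices (objective: simpler).

-- ===== PORT A =====
-- 'a' <= c <= 'z' or 'A' <= c <= 'Z' (exact: Char comparison is code-point order)
def pvIsLetter (c : Char) : Bool := ('a' ≤ c && c ≤ 'z') || ('A' ≤ c && c ≤ 'Z')

-- the for-loop of A: walks s, inserting the (possibly uppercased) correct_char
-- before the letter whose running letter_count equals pos
def pvGoA (pos : Int) (cc ccU : List Char) : List Char → Int → List Char
  | [], _ => []
  | c :: rest, cnt =>
    if pvIsLetter c then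
      if cnt == pos then
        (if PySem.Chars.isupper c then ccU else cc) ++ c :: pvGoA pos cc ccU rest (cnt + 1)
      else
        c :: pvGoA pos cc ccU rest (cnt + 1)
    else
      c :: pvGoA pos cc ccU rest cnt

def reconstruct_with_addition (s : String) (pos : Int) (correct_char : String) : String :=
  -- 'letters' in A is computed but never used; the loop starts at letter_count = 0
  String.ofList (pvGoA pos correct_char.toList (PySem.Str.upper correct_char).toList s.toList 0)

-- ===== PORT B =====
-- B's enumerate loop: returns the string index of the pos-th letter and whether it is uppercase
def pvFindB (pos : Int) : List Char → Int → Nat → Option (Nat × Bool)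
  | [], _, _ => none
  | c :: rest, cnt, i =>
    if pvIsLetter c then
      if cnt == pos then some (i, PySem.Chars.isupper c)
      else pvFindB pos rest (cnt + 1) (i + 1)
    else pvFindB pos rest cnt (i + 1)

def reconstruct_with_addition_alt (s : String) (pos : Int) (correct_char : String) : String :=
  match pvFindB pos s.toList 0 0 with
  | none => s
  | some (i, up) =>
    String.ofList (s.toList.take i ++
      (if up then PySem.Str.upper correct_char else correct_char).toList ++
      s.toList.drop i)

-- ===== PRECONDITION & SPEC =====
def Spec_reconstruct_with_addition (s : String) (pos : Int) (correct_char : String) (out : String) : Prop := out = reconstruct_with_addition_alt s pos correct_char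
instance (s : String) (pos : Int) (correct_char : String) (out : String) : Decidable (Spec_reconstruct_with_addition s pos correct_char out) := by unfold Spec_reconstruct_with_addition; infer_instance

-- ===== CLAIM (what is proved, stated in full; the proofs are below) =====
def Claim_equal_reconstruct_with_addition : Prop := ∀ (s : String) (pos : Int) (correct_char : String), Dom_reconstruct_with_addition s pos correct_char → Spec_reconstruct_with_addition s pos correct_char (reconstruct_with_addition s pos correct_char)

-- ===== LEMMAS AND PROOFS =====

-- once the running count has passed pos it never equals it again, so A copies s
lemma pvGoA_gt (pos : Int) (cc ccU : List Char) :
    ∀ (l : List Char) (cnt : Int), pos < cnt → pvGoA pos cc ccU l cnt = l := by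
  intro l
  induction l with
  | nil => intro cnt _; rfl
  | cons c rest ih =>
    intro cnt h
    have hne : (cnt == pos) = false := by
      simpa using (by omega : cnt ≠ pos)
    by_cases hl : pvIsLetter c
    · simp [pvGoA, hl, hne, ih (cnt + 1) (by omega)]
    · simp [pvGoA, hl, ih cnt h]

-- shifting the enumerate index shifts the returned position
lemma pvFindB_shift (pos : Int) :
    ∀ (l : List Char) (cnt : Int) (i : Nat),
      pvFindB pos l cnt i = (pvFindB pos l cnt 0).map (fun p => (p.1 + i, p.2)) := by
  intro l
  induction l with
  | nil => intro cnt i; rfl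
  | cons c rest ih =>
    intro cnt i
    by_cases hl : pvIsLetter c
    · by_cases hq : (cnt == pos) = true
      · simp [pvFindB, hl, hq]
      · simp only [pvFindB, hl, if_true, hq]
        rw [ih (cnt + 1) (i + 1), ih (cnt + 1) 1]
        cases pvFindB pos rest (cnt + 1) 0 with
        | none => rfl
        | some p => simp; omega
    · simp only [pvFindB, hl]
      rw [ih cnt (i + 1), ih cnt 1]
      cases pvFindB pos rest cnt 0 with
      | none => rfl
      | some p => simp; omega

-- core: A's loop equals B's find-and-splice, for every starting count
lemma pvGoA_eq_find (pos : Int) (cc ccU : List Char) :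
    ∀ (l : List Char) (cnt : Int),
      pvGoA pos cc ccU l cnt =
        match pvFindB pos l cnt 0 with
        | none => l
        | some (i, up) => l.take i ++ (if up then ccU else cc) ++ l.drop i := by
  intro l
  induction l with
  | nil => intro cnt; rfl
  | cons c rest ih =>
    intro cnt
    by_cases hl : pvIsLetter c
    · by_cases hq : (cnt == pos) = true
      · -- the pos-th letter: insert here; the tail is copied unchanged
        have hlt : pos < cnt + 1 := by
          have : cnt = pos := by simpa using hq
          omega
        simp only [pvGoA, pvFindB, hl, if_true, hq]
        rw [pvGoA_gt pos cc ccU rest (cnt + 1) hlt]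
        simp
      · simp only [pvGoA, pvFindB, hl, if_true, hq]
        rw [ih (cnt + 1), pvFindB_shift pos rest (cnt + 1) 1]
        cases pvFindB pos rest (cnt + 1) 0 with
        | none => rfl
        | some p => cases p; simp
    · simp only [pvGoA, pvFindB, hl]
      rw [ih cnt, pvFindB_shift pos rest cnt 1]
      cases pvFindB pos rest cnt 0 with
      | none => rfl
      | some p => cases p; simp

-- ===== VERDICT (by name: the statement is the Claim_ definition above) =====
theorem reconstruct_with_addition_spec : Claim_equal_reconstruct_with_addition := by
  intro s pos correct_char _
  unfold Spec_reconstruct_with_addition reconstruct_with_addition reconstruct_with_addition_alt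
  rw [pvGoA_eq_find]
  cases h : pvFindB pos s.toList 0 0 with
  | none => simp
  | some p => cases p with | mk i up => cases up <;> simp
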